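-- pv_equiv track=rewrite | github.com/Semih1997/CodingBat-Java-Problems-in-Python | CodingBat Java Recorsion-1/QparenBit.py | parenBit
-- ===== SOURCE A (Python) =====
-- def parenBit(a):
--     if len(a) == 0:
--         return a
--     elif a[0] == "(":
--         i = a.find(")")
--         return a[0:i+1] + parenBit(a[1:])
--     else:
--         return parenBit(a[1:])
-- ===== SOURCE B (Python) =====
-- def parenBit(a):
--     out = []
--     pending = []  # the '(' ... segments currently being built, in order of their '('
--     for c in a:
--         if c == "(":
--             pending.append("")
--         pending = [p + c for p in pending]
--         if c == ")":
--             out.extend(pending)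
--             pending = []
--     return "".join(out)
-- ===== Notes on version B (the rewrite author's own statement) =====
-- stated objective: faster
-- what changed: Replaced the quadratic recursion, which re-slices the string and re-runs find for every character, by a single left-to-right scan that grows each currently open segment in place and flushes them all at every closing parenthesis, joining at the end.
import Mathlib
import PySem

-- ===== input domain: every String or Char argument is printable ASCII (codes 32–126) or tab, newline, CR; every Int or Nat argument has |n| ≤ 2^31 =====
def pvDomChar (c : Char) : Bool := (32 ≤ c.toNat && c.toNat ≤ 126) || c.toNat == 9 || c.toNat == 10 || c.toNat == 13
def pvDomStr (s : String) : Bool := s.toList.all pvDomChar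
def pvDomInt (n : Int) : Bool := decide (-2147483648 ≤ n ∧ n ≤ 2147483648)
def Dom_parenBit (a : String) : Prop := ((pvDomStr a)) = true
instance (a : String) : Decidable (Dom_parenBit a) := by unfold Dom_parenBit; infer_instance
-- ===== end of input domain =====

-- B replaces A's quadratic recursion (which re-slices the string and re-runs find for every
-- character) by a single left-to-right scan growing each open '('-segment; return value only.

-- ===== PORT A =====
-- literal port of A's recursion, on the code-point list of the string
def parenBitL : List Char → List Char
  | [] => []                                   -- if len(a) == 0: return a
  | c :: rest =>
      if c = '(' then                          -- elif a[0] == "(":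
        let i := PySem.Chars.find (c :: rest) [')']            -- i = a.find(")")
        PySem.Chars.slice (c :: rest) (some 0) (some (i + 1))  -- a[0:i+1]
          ++ parenBitL rest                    -- + parenBit(a[1:])
      else parenBitL rest                      -- else: return parenBit(a[1:])

def parenBit (a : String) : String := String.mk (parenBitL a.toList)

-- ===== PORT B =====
-- one step of B's scan: state = (out, pending), both lists of char-lists
def parenBitAltStep (st : List (List Char) × List (List Char)) (c : Char) :
    List (List Char) × List (List Char) :=
  let pend := if c = '(' then st.2 ++ [[]] else st.2   -- pending.append("")
  let pend := pend.map (fun p => p ++ [c])             -- pending = [p + c for p in pending]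
  if c = ')' then (st.1 ++ pend, []) else (st.1, pend) -- out.extend(pending); pending = []

def parenBitAltL (l : List Char) : List Char :=
  let st := l.foldl parenBitAltStep ([], [])
  PySem.Chars.join [] st.1                             -- "".join(out)

def parenBit_alt (a : String) : String := String.mk (parenBitAltL a.toList)

-- ===== PRECONDITION & SPEC =====
def Spec_parenBit (a : String) (out : String) : Prop := out = parenBit_alt a
instance (a : String) (out : String) : Decidable (Spec_parenBit a out) := by unfold Spec_parenBit; infer_instance

-- ===== CLAIM (what is proved, stated in full; the proofs are below) =====
def Claim_equal_parenBit : Prop := ∀ (a : String), Dom_parenBit a → Spec_parenBit a (parenBit a)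

-- ===== LEMMAS AND PROOFS =====

-- the segment a '(' contributes: head up to and including the first ')' (empty if none)
def segA : List Char → List Char
  | [] => []
  | c :: r => if c = ')' then [')'] else if ')' ∈ r then c :: segA r else []

-- index of the first ')' (Python find convention: -1 if absent)
def idxC : List Char → Int
  | [] => -1
  | c :: r => if c = ')' then 0 else if idxC r = -1 then -1 else idxC r + 1

theorem singleton_infix_iff (a : Char) (l : List Char) : [a] <:+: l ↔ a ∈ l := by
  constructor
  · intro h; exact List.singleton_sublist.mp h.sublist
  · intro h
    obtain ⟨s, t, rfl⟩ := List.append_of_mem h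
    exact ⟨s, t, by simp⟩

theorem idxC_cases (l : List Char) :
    (idxC l = -1 ∧ ')' ∉ l) ∨ (0 ≤ idxC l ∧ ')' ∈ l) := by
  induction l with
  | nil => exact Or.inl ⟨rfl, by simp⟩
  | cons c r ih =>
    by_cases hc : c = ')'
    · exact Or.inr ⟨by simp [idxC, hc], by simp [hc]⟩
    · rcases ih with ⟨h1, h2⟩ | ⟨h1, h2⟩
      · exact Or.inl ⟨by simp [idxC, hc, h1], by simp [(show ¬')' = c from fun h => hc h.symm), h2]⟩
      · refine Or.inr ⟨?_, by simp [h2]⟩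
        have : idxC r ≠ -1 := by omega
        simp [idxC, hc, this]
        omega

theorem find_close_eq_idxC (l : List Char) : PySem.Chars.find l [')'] = idxC l := by
  induction l with
  | nil =>
    show PySem.Chars.find [] [')'] = -1
    rw [PySem.Chars.find_eq_neg_one_iff]
    simp
  | cons c r ih =>
    by_cases hc : c = ')'
    · -- first character matches: find = 0
      subst hc
      have hpre : [')'] <+: ')' :: r := ⟨r, rfl⟩
      have h0 : 0 ≤ PySem.Chars.find (')' :: r) [')'] :=
        (PySem.Chars.find_nonneg_iff _ _).mpr hpre.isInfix
      obtain ⟨hp, hmin⟩ := PySem.Chars.find_spec (s := ')' :: r) (sub := [')']) h0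
      have ht : (PySem.Chars.find (')' :: r) [')']).toNat = 0 := by
        by_contra h
        have h2 := hmin 0 (Nat.pos_of_ne_zero h)
        rw [List.drop_zero] at h2
        exact h2 hpre
      have hz : idxC (')' :: r) = 0 := by simp [idxC]
      rw [hz]
      omega
    · rcases idxC_cases r with ⟨h1, h2⟩ | ⟨h1, h2⟩
      · -- no ')' anywhere
        have hnot : ')' ∉ c :: r := by simp [(show ¬')' = c from fun h => hc h.symm), h2]
        have : PySem.Chars.find (c :: r) [')'] = -1 := by
          rw [PySem.Chars.find_eq_neg_one_iff]
          rw [singleton_infix_iff]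
          exact hnot
        simp [idxC, hc, h1, this]
      · -- first ')' is inside r
        have hfr : 0 ≤ PySem.Chars.find r [')'] := by rw [ih]; exact h1
        obtain ⟨hp, hmin⟩ := PySem.Chars.find_spec (s := r) (sub := [')']) hfr
        have hinf : [')'] <:+: c :: r := by
          rw [singleton_infix_iff]; simp [h2]
        have h0 : 0 ≤ PySem.Chars.find (c :: r) [')'] :=
          (PySem.Chars.find_nonneg_iff _ _).mpr hinf
        obtain ⟨hp', hmin'⟩ := PySem.Chars.find_spec (s := c :: r) (sub := [')']) h0
        have hfne : (PySem.Chars.find (c :: r) [')']).toNat ≠ 0 := by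
          intro h
          rw [h, List.drop_zero, List.cons_prefix_cons] at hp'
          exact hc hp'.1.symm
        have hle : (PySem.Chars.find (c :: r) [')']).toNat
            ≤ (PySem.Chars.find r [')']).toNat + 1 := by
          by_contra h
          have hmm := hmin' ((PySem.Chars.find r [')']).toNat + 1) (by omega)
          rw [List.drop_succ_cons] at hmm
          exact hmm hp
        have hge : (PySem.Chars.find r [')']).toNat + 1
            ≤ (PySem.Chars.find (c :: r) [')']).toNat := by
          by_contra h
          have hfj := hmin ((PySem.Chars.find (c :: r) [')']).toNat - 1) (by omega)
          have hd : (c :: r).drop (PySem.Chars.find (c :: r) [')']).toNat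
              = r.drop ((PySem.Chars.find (c :: r) [')']).toNat - 1) := by
            obtain ⟨k, hk⟩ : ∃ k, (PySem.Chars.find (c :: r) [')']).toNat = k + 1 :=
              ⟨(PySem.Chars.find (c :: r) [')']).toNat - 1, by omega⟩
            rw [hk]
            simp [List.drop_succ_cons]
          rw [hd] at hp'
          exact hfj hp'
        have hidx : idxC r ≠ -1 := by omega
        simp only [idxC, if_neg hc, if_neg hidx]
        rw [← ih]
        omega

theorem segA_nil_of_not_mem (l : List Char) (h : ')' ∉ l) : segA l = [] := by
  cases l with
  | nil => rfl
  | cons c r =>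
    have hc : c ≠ ')' := by intro hh; exact h (by simp [hh])
    have hr : ')' ∉ r := by intro hh; exact h (by simp [hh])
    simp [segA, hc, hr]

theorem take_idxC (l : List Char) (h : ')' ∈ l) :
    List.take ((idxC l).toNat + 1) l = segA l := by
  induction l with
  | nil => simp at h
  | cons c r ih =>
    by_cases hc : c = ')'
    · simp [idxC, segA, hc]
    · have hr : ')' ∈ r := by
        rcases List.mem_cons.mp h with h' | h'
        · exact absurd h'.symm hc
        · exact h'
      rcases idxC_cases r with ⟨_, h2⟩ | ⟨h1, _⟩
      · exact absurd hr h2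
      · have hne : idxC r ≠ -1 := by omega
        have ht : (idxC (c :: r)).toNat + 1 = ((idxC r).toNat + 1) + 1 := by
          simp only [idxC, if_neg hc, if_neg hne]
          omega
        rw [ht, List.take_succ_cons, ih hr]
        simp [segA, hc, hr]

theorem sliceA_eq_segA (l : List Char) :
    PySem.Chars.slice l (some 0) (some (PySem.Chars.find l [')'] + 1)) = segA l := by
  rw [find_close_eq_idxC]
  rcases idxC_cases l with ⟨h1, h2⟩ | ⟨h1, h2⟩
  · rw [h1, segA_nil_of_not_mem l h2]
    show PySem.Chars.slice l (some ((0 : Nat) : Int)) (some ((0 : Nat) : Int)) = []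
    rw [PySem.Chars.slice_eq_listSlice, PySem.List.slice_natCast]
    simp
  · have : idxC l + 1 = (((idxC l).toNat + 1 : Nat) : Int) := by omega
    rw [this, ← take_idxC l h2]
    show PySem.Chars.slice l (some ((0 : Nat) : Int)) _ = _
    rw [PySem.Chars.slice_eq_listSlice, PySem.List.slice_natCast]
    simp

theorem parenBitL_cons (c : Char) (r : List Char) :
    parenBitL (c :: r) = (if c = '(' then segA (c :: r) else []) ++ parenBitL r := by
  by_cases hc : c = '('
  · simp only [parenBitL, if_pos hc, sliceA_eq_segA]
  · simp [parenBitL, hc]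

theorem alt_inv (l : List Char) (acc pend : List (List Char)) :
    ((l.foldl parenBitAltStep (acc, pend)).1).flatten =
      acc.flatten ++ (if ')' ∈ l then (pend.map (fun p => p ++ segA l)).flatten else [])
        ++ parenBitL l := by
  induction l generalizing acc pend with
  | nil => simp [parenBitL]
  | cons c r ih =>
    rw [List.foldl_cons]
    by_cases hc2 : c = ')'
    · -- flush: everything pending closes here
      have hc : ¬ c = '(' := by simp [hc2]
      have hstep : parenBitAltStep (acc, pend) c =
          (acc ++ pend.map (fun p => p ++ [c]), []) := by
        simp [parenBitAltStep, hc, hc2]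
      rw [hstep, ih]
      rw [parenBitL_cons]
      simp [hc2, hc, segA, List.flatten_append, List.append_assoc]
    · by_cases hc : c = '('
      · -- open a new pending segment
        have hstep : parenBitAltStep (acc, pend) c =
            (acc, (pend ++ [[]]).map (fun p => p ++ [c])) := by
          simp [parenBitAltStep, hc, hc2]
        rw [hstep, ih]
        rw [parenBitL_cons]
        by_cases hr : ')' ∈ r
        · have hm : ')' ∈ c :: r := by simp [hr]
          simp only [if_pos hr, if_pos hm, if_pos hc, hc]
          simp [segA, hc2, hr, List.map_map, Function.comp_def, List.flatten_append,
            List.append_assoc]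
        · have hm : ')' ∉ c :: r := by simp [(show ¬')' = c from fun h => hc2 h.symm), hr]
          have hcc : ¬')' = c := fun h => hc2 h.symm
          simp [hr, hm, hc, segA, hcc]
      · -- ordinary character: extend every pending segment
        have hstep : parenBitAltStep (acc, pend) c =
            (acc, pend.map (fun p => p ++ [c])) := by
          simp [parenBitAltStep, hc, hc2]
        rw [hstep, ih]
        rw [parenBitL_cons]
        by_cases hr : ')' ∈ r
        · have hm : ')' ∈ c :: r := by simp [hr]
          simp [hr, hm, hc, segA, hc2, List.map_map, Function.comp_def, List.append_assoc]
        · have hm : ')' ∉ c :: r := by simp [(show ¬')' = c from fun h => hc2 h.symm), hr]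
          have hcc : ¬')' = c := fun h => hc2 h.symm
          simp [hr, hm, hc, segA, hcc]

theorem join_nil_eq_flatten (xs : List (List Char)) : PySem.Chars.join [] xs = xs.flatten := by
  show List.intercalate [] xs = xs.flatten
  induction xs with
  | nil => rfl
  | cons x t ih =>
    cases t with
    | nil => rfl
    | cons y t' =>
      show (List.intersperse [] (x :: y :: t')).flatten = _
      rw [show List.intersperse ([] : List Char) (x :: y :: t')
            = x :: [] :: List.intersperse [] (y :: t') from rfl]
      simp only [List.flatten_cons]
      rw [show (List.intersperse ([] : List Char) (y :: t')).flatten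
            = List.intercalate ([] : List Char) (y :: t') from rfl, ih]
      simp

theorem altL_eq_L (l : List Char) : parenBitAltL l = parenBitL l := by
  unfold parenBitAltL
  rw [join_nil_eq_flatten, alt_inv]
  simp

-- ===== VERDICT (by name: the statement is the Claim_ definition above) =====
theorem parenBit_spec : Claim_equal_parenBit := by
  intro a _
  show parenBit a = parenBit_alt a
  unfold parenBit parenBit_alt
  rw [altL_eq_L]
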